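-- pv_equiv track=rewrite | github.com/Blue-Roar/manosaba-textbox-js | utils/sentiment_analyzer.py | _extract_option
-- ===== SOURCE A (Python) =====
-- from typing import Optional, Dict, Any, List
--
-- def _extract_option(response: str, options: List[str]) -> Optional[str]:
--     """从AI回复中提取选项"""
--     # 清理回复文本，移除多余的空白和标点
--     cleaned_response = response.strip()
--
--     # 直接匹配选项（完全匹配）
--     for option in options:
--         if option == cleaned_response:
--             return option
--
--     # 如果完全匹配失败，尝试包含匹配
--     for option in options:
--         if option in cleaned_response:
--             return option
--
--     # 如果包含匹配失败，尝试忽略大小写匹配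
--     for option in options:
--         if option.lower() in cleaned_response.lower():
--             return option
--
--     return None
-- ===== SOURCE B (Python) =====
-- from typing import Optional, List
--
-- def _extract_option(response: str, options: List[str]) -> Optional[str]:
--     """Single pass: track the best-ranked candidate (exact > substring > case-insensitive)."""
--     cleaned = response.strip()
--     cleaned_lower = cleaned.lower()
--     best = None
--     best_rank = 3
--     for option in options:
--         if option == cleaned:
--             return option  # exact match: unbeatable, stop immediately
--         elif option in cleaned:
--             rank = 1
--         elif option.lower() in cleaned_lower:
--             rank = 2
--         else:
--             continue
--         if rank < best_rank:
--             best, best_rank = option, rank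
--     return best
-- ===== Notes on version B (the rewrite author's own statement) =====
-- stated objective: alternative
-- what changed: Replaces A's three sequential full scans (exact, substring, case-insensitive) with a single loop that tracks the best-ranked candidate and returns early on an exact match.
import Mathlib
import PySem

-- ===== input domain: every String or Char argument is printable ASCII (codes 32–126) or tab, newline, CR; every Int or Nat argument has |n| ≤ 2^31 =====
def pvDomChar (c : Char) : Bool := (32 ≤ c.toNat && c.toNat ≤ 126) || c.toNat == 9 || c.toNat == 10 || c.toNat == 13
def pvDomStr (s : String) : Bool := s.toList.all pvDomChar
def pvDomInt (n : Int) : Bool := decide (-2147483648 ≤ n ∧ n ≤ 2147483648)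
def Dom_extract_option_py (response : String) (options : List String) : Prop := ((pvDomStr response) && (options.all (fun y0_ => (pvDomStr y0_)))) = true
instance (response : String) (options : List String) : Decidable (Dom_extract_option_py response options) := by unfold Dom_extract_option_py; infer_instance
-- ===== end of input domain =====

-- B replaces A's three sequential scans with a single best-ranked-candidate loop (same return value).
-- ===== PORT A =====
def extract_option_py (response : String) (options : List String) : Option String :=
  let cleaned := PySem.Str.strip response
  match options.find? (fun o => o == cleaned) with
  | some o => some o
  | none =>
    match options.find? (fun o => PySem.Str.isIn o cleaned) with
    | some o => some o
    | none => options.find? (fun o => PySem.Str.isIn (PySem.Str.lower o) (PySem.Str.lower cleaned))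

-- ===== PORT B =====
-- one pass: state = (best candidate so far, its rank); exact match (rank 0) returns at once
def altLoop (cleaned clower : String) : List String → Option String → Nat → Option String
  | [], best, _ => best
  | o :: rest, best, bestRank =>
    if o == cleaned then some o
    else if PySem.Str.isIn o cleaned then
      if 1 < bestRank then altLoop cleaned clower rest (some o) 1
      else altLoop cleaned clower rest best bestRank
    else if PySem.Str.isIn (PySem.Str.lower o) clower then
      if 2 < bestRank then altLoop cleaned clower rest (some o) 2
      else altLoop cleaned clower rest best bestRank
    else altLoop cleaned clower rest best bestRank

def extract_option_py_alt (response : String) (options : List String) : Option String :=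
  let cleaned := PySem.Str.strip response
  altLoop cleaned (PySem.Str.lower cleaned) options none 3

-- ===== PRECONDITION & SPEC =====
def Spec_extract_option_py (response : String) (options : List String) (out : Option String) : Prop := out = extract_option_py_alt response options
instance (response : String) (options : List String) (out : Option String) : Decidable (Spec_extract_option_py response options out) := by unfold Spec_extract_option_py; infer_instance

-- ===== CLAIM (what is proved, stated in full; the proofs are below) =====
def Claim_equal_extract_option_py : Prop := ∀ (response : String) (options : List String), Dom_extract_option_py response options → Spec_extract_option_py response options (extract_option_py response options)

-- ===== LEMMAS AND PROOFS =====
-- state (some w, 1): only an exact match can still replace w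
lemma altLoop_one (c cl w : String) : ∀ l : List String,
    altLoop c cl l (some w) 1 =
      match l.find? (fun o => o == c) with
      | some o => some o
      | none => some w := by
  intro l
  induction l with
  | nil => rfl
  | cons o rest ih =>
    by_cases h0 : (o == c) = true
    · simp [altLoop, List.find?, h0]
    · by_cases h1 : PySem.Chars.isIn o.toList c.toList = true
      · simp [altLoop, List.find?, h0, h1, ih]
      · by_cases h2 : PySem.Chars.isIn (PySem.Chars.lower o.toList) cl.toList = true
        · simp [altLoop, List.find?, h0, h1, h2, ih]
        · simp [altLoop, List.find?, h0, h1, h2, ih]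

-- state (some w, 2): an exact or plain substring match can still replace w
lemma altLoop_two (c cl w : String) : ∀ l : List String,
    altLoop c cl l (some w) 2 =
      match l.find? (fun o => o == c) with
      | some o => some o
      | none =>
        match l.find? (fun o => PySem.Str.isIn o c) with
        | some o => some o
        | none => some w := by
  intro l
  induction l with
  | nil => rfl
  | cons o rest ih =>
    by_cases h0 : (o == c) = true
    · simp [altLoop, List.find?, h0]
    · by_cases h1 : PySem.Chars.isIn o.toList c.toList = true
      · simp [altLoop, List.find?, h0, h1, altLoop_one]
      · by_cases h2 : PySem.Chars.isIn (PySem.Chars.lower o.toList) cl.toList = true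
        · simp [altLoop, List.find?, h0, h1, h2, ih]
        · simp [altLoop, List.find?, h0, h1, h2, ih]

-- initial state (none, 3): B's single pass equals A's three sequential scans
lemma altLoop_three (c cl : String) : ∀ l : List String,
    altLoop c cl l none 3 =
      match l.find? (fun o => o == c) with
      | some o => some o
      | none =>
        match l.find? (fun o => PySem.Str.isIn o c) with
        | some o => some o
        | none => l.find? (fun o => PySem.Str.isIn (PySem.Str.lower o) cl) := by
  intro l
  induction l with
  | nil => rfl
  | cons o rest ih =>
    by_cases h0 : (o == c) = true
    · simp [altLoop, List.find?, h0]
    · by_cases h1 : PySem.Chars.isIn o.toList c.toList = true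
      · simp [altLoop, List.find?, h0, h1, altLoop_one]
      · by_cases h2 : PySem.Chars.isIn (PySem.Chars.lower o.toList) cl.toList = true
        · simp [altLoop, List.find?, h0, h1, h2, altLoop_two]
        · simp [altLoop, List.find?, h0, h1, h2, ih]

-- ===== VERDICT (by name: the statement is the Claim_ definition above) =====
theorem extract_option_py_spec : Claim_equal_extract_option_py := by
  intro response options _
  unfold Spec_extract_option_py extract_option_py extract_option_py_alt
  rw [altLoop_three]
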